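-- pv_equiv track=rewrite | github.com/moazhassan751/optimized-rag-system | chunking.py | _detect_semantic_boundaries
-- ===== SOURCE A (Python) =====
-- from typing import List, Dict, Optional, Tuple
--
-- def _detect_semantic_boundaries(sentences: List[str]) -> List[int]:
--     """Detect semantic boundaries between sentences for better chunking."""
--     if len(sentences) < 2:
--         return []
--
--     boundaries = []
--
--     # Simple semantic boundary detection based on topic shift indicators
--     topic_shift_indicators = [
--         'now', 'however', 'meanwhile', 'on the other hand', 'in contrast',
--         'furthermore', 'additionally', 'moreover', 'nevertheless', 'nonetheless',
--         'but', 'yet', 'although', 'while', 'whereas'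
--     ]
--
--     # Keywords that might indicate topic shifts
--     ai_keywords = ['ai', 'artificial intelligence', 'machine learning', 'neural', 'algorithm']
--     car_keywords = ['car', 'vehicle', 'automobile', 'drive', 'speed', 'fast']
--
--     for i in range(1, len(sentences)):
--         current_sentence = sentences[i].lower()
--         previous_sentence = sentences[i-1].lower()
--
--         # Check for explicit transition words
--         has_transition = any(indicator in current_sentence for indicator in topic_shift_indicators)
--
--         # Check for topic shift (simple keyword-based)
--         prev_has_ai = any(keyword in previous_sentence for keyword in ai_keywords)
--         curr_has_car = any(keyword in current_sentence for keyword in car_keywords)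
--         curr_has_ai = any(keyword in current_sentence for keyword in ai_keywords)
--         prev_has_car = any(keyword in previous_sentence for keyword in car_keywords)
--
--         # Detect topic shift from AI to cars or vice versa
--         topic_shift = (prev_has_ai and curr_has_car) or (prev_has_car and curr_has_ai)
--
--         if has_transition or topic_shift:
--             boundaries.append(i)
--
--     return boundaries
-- ===== SOURCE B (Python) =====
-- def _detect_semantic_boundaries(sentences):
--     """Detect semantic boundaries between sentences for better chunking."""
--     topic_shift_indicators = [
--         'now', 'however', 'meanwhile', 'on the other hand', 'in contrast',
--         'furthermore', 'additionally', 'moreover', 'nevertheless', 'nonetheless',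
--         'but', 'yet', 'although', 'while', 'whereas'
--     ]
--     ai_keywords = ['ai', 'artificial intelligence', 'machine learning', 'neural', 'algorithm']
--     car_keywords = ['car', 'vehicle', 'automobile', 'drive', 'speed', 'fast']
--
--     lows = [s.lower() for s in sentences]
--
--     def hits(words):
--         return {i for i, t in enumerate(lows) if any(w in t for w in words)}
--
--     # Index sets per category, one membership pass each.
--     trans, ai, car = hits(topic_shift_indicators), hits(ai_keywords), hits(car_keywords)
--
--     # A topic shift lands at the successor of an AI index that is a car index, or vice versa.
--     shift = {i + 1 for i in ai if i + 1 in car} | {i + 1 for i in car if i + 1 in ai}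
--
--     # Boundaries: transition or shift positions, restricted to valid successor indices.
--     return sorted((trans | shift) & set(range(1, len(sentences))))
-- ===== Notes on version B (the rewrite author's own statement) =====
-- stated objective: alternative
-- what changed: Instead of scanning adjacent sentence pairs and appending indices in order, B computes three index SETS (transition/ai/car hits), derives the shift set by successor arithmetic on the ai and car sets, and produces the result as sorted((trans | shift) & set(range(1, n))) - set algebra plus a final sort replaces the ordered pair loop.
import Mathlib
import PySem

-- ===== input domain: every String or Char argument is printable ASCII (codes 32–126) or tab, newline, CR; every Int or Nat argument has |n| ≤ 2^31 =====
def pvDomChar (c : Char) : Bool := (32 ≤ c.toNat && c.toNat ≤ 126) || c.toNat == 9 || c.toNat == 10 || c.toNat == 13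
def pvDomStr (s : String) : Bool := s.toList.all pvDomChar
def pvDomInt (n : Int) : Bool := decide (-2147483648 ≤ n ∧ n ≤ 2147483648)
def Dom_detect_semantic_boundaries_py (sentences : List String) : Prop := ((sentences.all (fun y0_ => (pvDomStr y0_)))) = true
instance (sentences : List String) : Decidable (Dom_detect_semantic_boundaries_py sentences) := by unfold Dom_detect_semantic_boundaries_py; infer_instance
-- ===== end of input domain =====

-- B replaces the ordered adjacent-pair loop by set algebra: it builds the index sets of
-- transition/ai/car hits, forms the shift set by successor arithmetic, and sorts
-- (trans | shift) & range(1, n); equivalence is proved on all inputs (A is total).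

-- ===== PORT A =====
def topicShiftIndicators : List String :=
  ["now", "however", "meanwhile", "on the other hand", "in contrast",
   "furthermore", "additionally", "moreover", "nevertheless", "nonetheless",
   "but", "yet", "although", "while", "whereas"]

def aiKeywords : List String :=
  ["ai", "artificial intelligence", "machine learning", "neural", "algorithm"]

def carKeywords : List String :=
  ["car", "vehicle", "automobile", "drive", "speed", "fast"]

def detect_semantic_boundaries_py (sentences : List String) : List Int :=
  if sentences.length < 2 then []
  else
    (PySem.List.pyRange 1 (PySem.List.len sentences) 1).foldl (fun boundaries i =>
      let current_sentence := PySem.Str.lower (PySem.List.pyGetD sentences i "")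
      let previous_sentence := PySem.Str.lower (PySem.List.pyGetD sentences (i - 1) "")
      let has_transition := topicShiftIndicators.any (fun ind => PySem.Str.isIn ind current_sentence)
      let prev_has_ai := aiKeywords.any (fun kw => PySem.Str.isIn kw previous_sentence)
      let curr_has_car := carKeywords.any (fun kw => PySem.Str.isIn kw current_sentence)
      let curr_has_ai := aiKeywords.any (fun kw => PySem.Str.isIn kw current_sentence)
      let prev_has_car := carKeywords.any (fun kw => PySem.Str.isIn kw previous_sentence)
      let topic_shift := (prev_has_ai && curr_has_car) || (prev_has_car && curr_has_ai)
      if has_transition || topic_shift then boundaries ++ [i] else boundaries) []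

-- ===== PORT B =====
-- hits(words): the set of indices whose lowered sentence contains one of the words
def hitSet (lows : List String) (words : List String) : PySem.Set Int :=
  PySem.Set.ofList ((PySem.List.enumerate lows 0).filterMap
    (fun q => if words.any (fun w => PySem.Str.isIn w q.2) then some q.1 else none))

def detect_semantic_boundaries_py_alt (sentences : List String) : List Int :=
  let lows := sentences.map PySem.Str.lower
  let trans := hitSet lows topicShiftIndicators
  let ai := hitSet lows aiKeywords
  let car := hitSet lows carKeywords
  let shift := PySem.Set.union
    (PySem.Set.ofList (ai.filterMap (fun i =>
      if PySem.Set.contains car (i + 1) then some (i + 1) else none)))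
    (PySem.Set.ofList (car.filterMap (fun i =>
      if PySem.Set.contains ai (i + 1) then some (i + 1) else none)))
  PySem.List.sorted
    (PySem.Set.inter (PySem.Set.union trans shift)
      (PySem.Set.ofList (PySem.List.pyRange 1 (PySem.List.len sentences) 1)))
    (fun x => x) false

-- ===== PRECONDITION & SPEC =====
def Spec_detect_semantic_boundaries_py (sentences : List String) (out : List Int) : Prop := out = detect_semantic_boundaries_py_alt sentences
instance (sentences : List String) (out : List Int) : Decidable (Spec_detect_semantic_boundaries_py sentences out) := by unfold Spec_detect_semantic_boundaries_py; infer_instance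

-- ===== CLAIM (what is proved, stated in full; the proofs are below) =====
def Claim_equal_detect_semantic_boundaries_py : Prop := ∀ (sentences : List String), Dom_detect_semantic_boundaries_py sentences → Spec_detect_semantic_boundaries_py sentences (detect_semantic_boundaries_py sentences)

-- ===== LEMMAS AND PROOFS =====

-- pyRange a b with step 1 is strictly increasing
theorem pyRange_one_pairwise_lt_aux (n : Nat) : ∀ a b : Int, (b - a).toNat = n →
    (PySem.List.pyRange a b).Pairwise (· < ·) := by
  induction n with
  | zero =>
    intro a b h
    rw [PySem.List.pyRange_one_eq_nil (by omega)]
    exact List.Pairwise.nil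
  | succ k ih =>
    intro a b h
    rw [PySem.List.pyRange_one_cons (by omega)]
    refine List.Pairwise.cons ?_ (ih (a + 1) b (by omega))
    intro x hx
    have := PySem.List.mem_pyRange_one.mp hx
    omega

theorem pyRange_one_pairwise_lt (a b : Int) : (PySem.List.pyRange a b).Pairwise (· < ·) :=
  pyRange_one_pairwise_lt_aux (b - a).toNat a b rfl

theorem pyRange_one_nodup (a b : Int) : (PySem.List.pyRange a b).Nodup :=
  (pyRange_one_pairwise_lt a b).imp (fun h => ne_of_lt h)

-- enumerate as a map over the index range
theorem enumerate_eq_map_pyRange (l : List String) :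
    PySem.List.enumerate l 0
      = (PySem.List.pyRange 0 (PySem.List.len l)).map
          (fun i => (i, PySem.List.pyGetD l i "")) := by
  apply List.ext_getElem?
  intro k
  rw [PySem.List.getElem?_enumerate, List.getElem?_map, PySem.List.getElem?_pyRange_one]
  by_cases hk : k < l.length
  · have hif : k < ((PySem.List.len l) - 0).toNat := by simp [PySem.List.len]; omega
    rw [if_pos hif, List.getElem?_eq_getElem hk]
    simp only [Option.map_some]
    have h2 : (0 : Int) + (k : Int) = ((k : Nat) : Int) := by omega
    rw [h2, PySem.List.pyGetD_natCast]
    simp [List.getD_eq_getElem?_getD, hk]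
  · have hif : ¬ k < ((PySem.List.len l) - 0).toNat := by simp [PySem.List.len]; omega
    rw [if_neg hif, List.getElem?_eq_none_iff.mpr (by omega)]
    rfl

theorem filterMap_if_eq_filter {α : Type} (p : α → Bool) (l : List α) :
    l.filterMap (fun x => if p x then some x else none) = l.filter p := by
  induction l with
  | nil => rfl
  | cons x t ih => by_cases h : p x <;> simp [h, ih]

-- the hit set is the filtered index range (the ofList is redundant: indices are distinct)
theorem hitSet_eq_filter (lows words : List String) :
    hitSet lows words
      = (PySem.List.pyRange 0 (PySem.List.len lows)).filter
          (fun i => words.any (fun w => PySem.Str.isIn w (PySem.List.pyGetD lows i ""))) := by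
  unfold hitSet
  rw [enumerate_eq_map_pyRange, List.filterMap_map]
  have : (fun i => if words.any (fun w => PySem.Str.isIn w ((fun i => (i, PySem.List.pyGetD lows i "")) i).2) then some ((fun i => (i, PySem.List.pyGetD lows i "")) i).1 else none)
       = (fun i : Int => if words.any (fun w => PySem.Str.isIn w (PySem.List.pyGetD lows i "")) then some i else none) := rfl
  rw [show ((fun q : Int × String => if words.any (fun w => PySem.Str.isIn w q.2) then some q.1 else none) ∘ (fun i => (i, PySem.List.pyGetD lows i "")))
        = (fun i : Int => if words.any (fun w => PySem.Str.isIn w (PySem.List.pyGetD lows i "")) then some i else none) from rfl,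
      filterMap_if_eq_filter]
  exact PySem.Set.ofList_eq_self_of_nodup _ (List.Nodup.filter _ (pyRange_one_nodup 0 _))

-- membership in a hit set
theorem mem_hitSet (lows words : List String) (i : Int) :
    i ∈ hitSet lows words ↔
      (0 ≤ i ∧ i < lows.length) ∧
      words.any (fun w => PySem.Str.isIn w (PySem.List.pyGetD lows i "")) = true := by
  rw [hitSet_eq_filter, List.mem_filter, PySem.List.mem_pyRange_one]
  simp [PySem.List.len]

-- in-range indexing commutes with the lowering map
theorem pyGetD_map_lower (xs : List String) (i : Int) (h0 : 0 ≤ i) (h1 : i < xs.length) :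
    PySem.List.pyGetD (xs.map PySem.Str.lower) i ""
      = PySem.Str.lower (PySem.List.pyGetD xs i "") := by
  have hi : i = ((i.toNat : Nat) : Int) := by omega
  rw [hi, PySem.List.pyGetD_natCast, PySem.List.pyGetD_natCast]
  have hlt : i.toNat < xs.length := by omega
  simp [List.getD_eq_getElem?_getD, hlt]

-- B as a filter of the index range over the lowered sentences
theorem alt_eq_filter (xs : List String) :
    detect_semantic_boundaries_py_alt xs
      = (PySem.List.pyRange 1 (PySem.List.len xs)).filter
          (fun i =>
            let lows := xs.map PySem.Str.lower
            let cur := PySem.List.pyGetD lows i ""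
            let prev := PySem.List.pyGetD lows (i - 1) ""
            topicShiftIndicators.any (fun w => PySem.Str.isIn w cur) ||
            ((aiKeywords.any (fun w => PySem.Str.isIn w prev) &&
              carKeywords.any (fun w => PySem.Str.isIn w cur)) ||
             (carKeywords.any (fun w => PySem.Str.isIn w prev) &&
              aiKeywords.any (fun w => PySem.Str.isIn w cur)))) := by
  unfold detect_semantic_boundaries_py_alt
  apply PySem.List.sorted_eq_of_perm_of_pairwise_lt
  · -- the filtered range is a permutation of the computed set
    refine (List.perm_ext_iff_of_nodup
        (List.Nodup.filter _ ((pyRange_one_pairwise_lt 1 _).imp (fun h => ne_of_lt h)))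
        (PySem.Set.nodup_inter _ _ (PySem.Set.nodup_union _ _ ?_))).mpr ?_
    · rw [hitSet_eq_filter]; exact List.Nodup.filter _ (pyRange_one_nodup 0 _)
    intro i
    set lows := xs.map PySem.Str.lower with hlows
    have hlxs : lows.length = xs.length := by rw [hlows]; exact List.length_map ..
    rw [List.mem_filter, PySem.Set.mem_inter, PySem.Set.mem_union, PySem.Set.mem_ofList,
        PySem.Set.mem_union, PySem.Set.mem_ofList, PySem.Set.mem_ofList,
        PySem.List.mem_pyRange_one]
    constructor
    · rintro ⟨hr, hc⟩
      have hb : 1 ≤ i ∧ i < (xs.length : Int) := by simpa [PySem.List.len] using hr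
      refine ⟨?_, hr⟩
      simp only [Bool.or_eq_true, Bool.and_eq_true] at hc
      rcases hc with ht | ⟨ha, hcar⟩ | ⟨hcar, ha⟩
      · left
        exact (mem_hitSet lows topicShiftIndicators i).mpr
          ⟨by rw [hlxs]; omega, ht⟩
      · right; left
        rw [List.mem_filterMap]
        refine ⟨i - 1, ?_, ?_⟩
        · exact (mem_hitSet lows aiKeywords (i - 1)).mpr ⟨by rw [hlxs]; omega, ha⟩
        · rw [if_pos ((PySem.Set.contains_iff _ _).mpr
            ((mem_hitSet lows carKeywords (i - 1 + 1)).mpr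
              (by rw [show i - 1 + 1 = i by omega]
                  exact ⟨by rw [hlxs]; omega, hcar⟩)))]
          rw [show i - 1 + 1 = i by omega]
      · right; right
        rw [List.mem_filterMap]
        refine ⟨i - 1, ?_, ?_⟩
        · exact (mem_hitSet lows carKeywords (i - 1)).mpr ⟨by rw [hlxs]; omega, hcar⟩
        · rw [if_pos ((PySem.Set.contains_iff _ _).mpr
            ((mem_hitSet lows aiKeywords (i - 1 + 1)).mpr
              (by rw [show i - 1 + 1 = i by omega]
                  exact ⟨by rw [hlxs]; omega, ha⟩)))]
          rw [show i - 1 + 1 = i by omega]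
    · rintro ⟨hc, hr⟩
      refine ⟨hr, ?_⟩
      simp only [Bool.or_eq_true, Bool.and_eq_true]
      rcases hc with ht | hs | hs
      · exact Or.inl ((mem_hitSet lows topicShiftIndicators i).mp ht).2
      · rw [List.mem_filterMap] at hs
        obtain ⟨j, hj, hji⟩ := hs
        by_cases hcj : PySem.Set.contains (hitSet lows carKeywords) (j + 1) = true
        · rw [if_pos hcj] at hji
          have hij : i = j + 1 := by injection hji with h; omega
          have ha := (mem_hitSet lows aiKeywords j).mp hj
          have hcar := (mem_hitSet lows carKeywords (j + 1)).mp ((PySem.Set.contains_iff _ _).mp hcj)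
          right; left
          rw [show i - 1 = j by omega]
          exact ⟨ha.2, by rw [hij]; exact hcar.2⟩
        · rw [if_neg hcj] at hji; exact absurd hji (by simp)
      · rw [List.mem_filterMap] at hs
        obtain ⟨j, hj, hji⟩ := hs
        by_cases hcj : PySem.Set.contains (hitSet lows aiKeywords) (j + 1) = true
        · rw [if_pos hcj] at hji
          have hij : i = j + 1 := by injection hji with h; omega
          have hcar := (mem_hitSet lows carKeywords j).mp hj
          have ha := (mem_hitSet lows aiKeywords (j + 1)).mp ((PySem.Set.contains_iff _ _).mp hcj)
          right; right
          rw [show i - 1 = j by omega]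
          exact ⟨hcar.2, by rw [hij]; exact ha.2⟩
        · rw [if_neg hcj] at hji; exact absurd hji (by simp)
  · exact (pyRange_one_pairwise_lt 1 _).filter _

-- ===== VERDICT (by name: the statement is the Claim_ definition above) =====
theorem detect_semantic_boundaries_py_spec : Claim_equal_detect_semantic_boundaries_py := by
  intro xs _
  unfold Spec_detect_semantic_boundaries_py
  rw [alt_eq_filter]
  unfold detect_semantic_boundaries_py
  by_cases h : xs.length < 2
  · rw [if_pos h, PySem.List.pyRange_one_eq_nil (by simp [PySem.List.len]; omega)]
    rfl
  · rw [if_neg h]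
    simp only [PySem.List.foldl_append_if_eq_filter, List.nil_append]
    apply List.filter_congr
    intro i hi
    have hr := PySem.List.mem_pyRange_one.mp hi
    have hn : i < xs.length := by
      have : i < PySem.List.len xs := hr.2
      simpa [PySem.List.len] using this
    simp only [pyGetD_map_lower xs i (by omega) (by omega),
        pyGetD_map_lower xs (i - 1) (by omega) (by omega)]
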